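-- pv_equiv track=rewrite | github.com/miguel-mzbi/SolutionsCrackingTheCode | 1.4.py | replaceFast
-- ===== SOURCE A (Python) =====
-- def replaceFast(string):
--     if len(string) == 0:
--         return string
--     if len(string) == 1:
--         if string[0] != ' ':
--             return string
--
--     spaceCount = 0
--     for letter in string:
--         if letter == ' ':
--             spaceCount += 1
--
--     if spaceCount == 0:
--         return string
--
--     pLen = len(string)
--     newLen = len(string)+2*spaceCount
--     for j in range(2*spaceCount):
--         string.append('')
--     for k in range(pLen-1, -1, -1):
--         if string[k] == ' ':
--             string[newLen-1] = '0'
--             string[newLen-2] = '2'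
--             string[newLen-3] = '%'
--             newLen -= 3
--         else:
--             string[newLen-1] = string[k]
--             newLen -= 1
--     return string
-- ===== SOURCE B (Python) =====
-- def replaceFast(string):
--     result = []
--     for letter in string:
--         if letter == ' ':
--             result.append('%')
--             result.append('2')
--             result.append('0')
--         else:
--             result.append(letter)
--     string[:] = result
--     return string
-- ===== Notes on version B (the rewrite author's own statement) =====
-- stated objective: simpler
-- what changed: Replaced the count-extend-then-backward-fill in-place algorithm with a single forward pass that builds the result and writes it back with slice assignment.
import Mathlib
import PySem

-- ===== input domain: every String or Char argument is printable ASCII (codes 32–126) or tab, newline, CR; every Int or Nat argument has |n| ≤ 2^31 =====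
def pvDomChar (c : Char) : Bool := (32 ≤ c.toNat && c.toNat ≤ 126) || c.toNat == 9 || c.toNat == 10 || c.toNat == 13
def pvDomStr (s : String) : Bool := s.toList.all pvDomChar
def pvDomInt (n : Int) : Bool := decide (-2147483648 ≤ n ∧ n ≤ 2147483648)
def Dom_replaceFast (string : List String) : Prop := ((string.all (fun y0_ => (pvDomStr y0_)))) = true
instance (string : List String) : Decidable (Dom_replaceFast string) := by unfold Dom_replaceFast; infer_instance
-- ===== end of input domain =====

-- B replaces A's count/extend/backward-fill in-place machinery with one forward pass that builds the
-- result list (both Pythons mutate the argument to the same final contents; this file proves the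
-- return value, which is identical).

-- ===== PORT A =====
-- body of A's backward loop: state st = (buffer, newLen), k the loop index
def fillStep (st : List String × Int) (k : Int) : List String × Int :=
  if PySem.List.pyGetD st.1 k "" = " " then
    (PySem.List.pySetD (PySem.List.pySetD (PySem.List.pySetD st.1 (st.2 - 1) "0") (st.2 - 2) "2")
        (st.2 - 3) "%", st.2 - 3)
  else
    (PySem.List.pySetD st.1 (st.2 - 1) (PySem.List.pyGetD st.1 k ""), st.2 - 1)

def replaceFast (string : List String) : List String :=
  if string.length = 0 then string
  else if string.length = 1 ∧ ¬ (PySem.List.pyGetD string 0 "" = " ") then string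
  else
    let spaceCount : Int := string.foldl (fun acc letter => if letter = " " then acc + 1 else acc) 0
    if spaceCount = 0 then string
    else
      let pLen : Int := string.length
      let newLen : Int := (string.length : Int) + 2 * spaceCount
      let buf := (PySem.List.pyRange 0 (2 * spaceCount) 1).foldl (fun b _ => b ++ [""]) string
      ((PySem.List.pyRange (pLen - 1) (-1) (-1)).foldl fillStep (buf, newLen)).1

-- ===== PORT B =====
def replaceFast_alt (string : List String) : List String :=
  string.foldl
    (fun result letter =>
      if letter = " " then result ++ ["%"] ++ ["2"] ++ ["0"] else result ++ [letter]) []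

-- ===== PRECONDITION & SPEC =====
def Spec_replaceFast (string : List String) (out : List String) : Prop := out = replaceFast_alt string
instance (string : List String) (out : List String) : Decidable (Spec_replaceFast string out) := by unfold Spec_replaceFast; infer_instance

-- ===== CLAIM (what is proved, stated in full; the proofs are below) =====
def Claim_equal_replaceFast : Prop := ∀ (string : List String), Dom_replaceFast string → Spec_replaceFast string (replaceFast string)

-- ===== LEMMAS AND PROOFS =====

-- what one input character contributes to the output
def pvExpand (c : String) : List String := if c = " " then ["%", "2", "0"] else [c]

theorem alt_eq_flatMap (s : List String) : replaceFast_alt s = s.flatMap pvExpand := by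
  unfold replaceFast_alt
  have hfun : (fun (result : List String) (letter : String) =>
      if letter = " " then result ++ ["%"] ++ ["2"] ++ ["0"] else result ++ [letter])
      = (fun acc x => acc ++ pvExpand x) := by
    funext acc x
    by_cases h : x = " " <;> simp [pvExpand, h]
  rw [hfun, PySem.List.foldl_append_eq_flatMap]
  simp

theorem flatMap_no_space (s : List String) (h : s.countP (fun c => c == " ") = 0) :
    s.flatMap pvExpand = s := by
  induction s with
  | nil => simp
  | cons a t ih =>
    simp only [List.countP_cons] at h
    by_cases ha : a = " "
    · simp [ha] at h
    · have hb : (a == " ") = false := by simp [ha]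
      rw [hb] at h
      simp only [Bool.false_eq_true, if_false, Nat.add_zero] at h
      simp [pvExpand, ha, ih h]

theorem pad_foldl (l : List Int) (s : List String) :
    l.foldl (fun b _ => b ++ [""]) s = s ++ List.replicate l.length "" := by
  induction l generalizing s with
  | nil => simp
  | cons x t ih =>
    rw [List.foldl_cons, ih]
    simp [List.replicate_succ]

theorem pvSetShift {α : Type} (p q : List α) (j : Nat) (v : α) :
    (p ++ q).set (p.length + j) v = p ++ q.set j v := by
  rw [List.set_append, if_neg (by omega)]
  simp

theorem pvSetAtLen {α : Type} (q r : List α) (v : α) (j : Nat) (hj : j + 1 = q.length) :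
    (q ++ r).set j v = q.take j ++ v :: r := by
  rw [List.set_append, if_pos (by omega)]
  rw [List.set_eq_take_append_cons_drop, if_pos (by omega)]
  have hdrop : q.drop (j + 1) = [] := by rw [hj]; simp
  simp [hdrop]

theorem pvTwoSnoc {α : Type} (mid : List α) (h : 2 ≤ mid.length) :
    ∃ m' x y, mid = m' ++ [x, y] := by
  rcases mid.eq_nil_or_concat with rfl | ⟨m1, y, rfl⟩
  · simp at h
  rcases m1.eq_nil_or_concat with rfl | ⟨m2, x, rfl⟩
  · simp at h
  exact ⟨m2, x, y, by simp⟩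

theorem fill_loop (p : List String) :
    ∀ (mid d : List String), mid.length = 2 * p.countP (fun c => c == " ") →
    ((PySem.List.pyRange ((p.length : Int) - 1) (-1) (-1)).foldl fillStep
        (p ++ (mid ++ d), ((p.length + mid.length : Nat) : Int))).1
      = p.flatMap pvExpand ++ d := by
  induction p using List.reverseRecOn with
  | nil =>
    intro mid d h
    simp only [List.countP_nil, Nat.mul_zero, List.length_eq_zero_iff] at h
    subst h
    rw [show ((([] : List String).length : Int) - 1) = (-1 : Int) by norm_num]
    rw [PySem.List.pyRange_neg_one_eq_nil (by omega)]
    simp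
  | append_singleton p' a ih =>
    intro mid d h
    have hcons : PySem.List.pyRange (((p' ++ [a]).length : Int) - 1) (-1) (-1)
        = ((p'.length : Nat) : Int) :: PySem.List.pyRange ((p'.length : Int) - 1) (-1) (-1) := by
      rw [show (((p' ++ [a]).length : Int) - 1) = ((p'.length : Nat) : Int) by simp]
      rw [PySem.List.pyRange_neg_one_cons (by omega)]
    rw [hcons, List.foldl_cons]
    set N : Int := (((p' ++ [a]).length + mid.length : Nat) : Int) with hN
    have hget : PySem.List.pyGetD ((p' ++ [a]) ++ (mid ++ d)) ((p'.length : Nat) : Int) "" = a := by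
      rw [show (p' ++ [a]) ++ (mid ++ d) = p' ++ (a :: (mid ++ d)) by simp]
      rw [PySem.List.pyGetD_natCast, List.getD_append_right _ _ _ _ (le_refl _)]
      simp
    by_cases ha : a = " "
    · subst ha
      have hcp : mid.length = 2 * p'.countP (fun c => c == " ") + 2 := by
        simp only [List.countP_append, List.countP_cons] at h
        simp at h
        omega
      obtain ⟨m', x, y, rfl⟩ := pvTwoSnoc mid (by omega)
      have hm' : m'.length = 2 * p'.countP (fun c => c == " ") := by
        simp at hcp; omega
      have hstep : fillStep ((p' ++ [" "]) ++ ((m' ++ [x, y]) ++ d), N) ((p'.length : Nat) : Int)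
          = (p' ++ ((" " :: m').take m'.length ++ ("%" :: "2" :: "0" :: d)),
             ((p'.length + ((" " :: m').take m'.length).length : Nat) : Int)) := by
        simp only [fillStep]
        rw [if_pos hget]
        have w1 : PySem.List.pySetD ((p' ++ [" "]) ++ ((m' ++ [x, y]) ++ d)) (N - 1) "0"
            = (p' ++ " " :: m') ++ (x :: "0" :: d) := by
          rw [show N - 1 = (((p'.length + m'.length + 2) : Nat) : Int) by rw [hN]; simp; omega]
          rw [PySem.List.pySetD_natCast]
          rw [show (p' ++ [" "]) ++ ((m' ++ [x, y]) ++ d) = (p' ++ " " :: m') ++ (x :: y :: d) by simp]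
          rw [show p'.length + m'.length + 2 = (p' ++ " " :: m').length + 1 by simp; omega]
          rw [pvSetShift]
          rfl
        have w2 : PySem.List.pySetD ((p' ++ " " :: m') ++ (x :: "0" :: d)) (N - 2) "2"
            = (p' ++ " " :: m') ++ ("2" :: "0" :: d) := by
          rw [show N - 2 = (((p'.length + m'.length + 1) : Nat) : Int) by rw [hN]; simp; omega]
          rw [PySem.List.pySetD_natCast]
          rw [show p'.length + m'.length + 1 = (p' ++ " " :: m').length + 0 by simp; omega]
          rw [pvSetShift]
          rfl
        have w3 : PySem.List.pySetD ((p' ++ " " :: m') ++ ("2" :: "0" :: d)) (N - 3) "%"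
            = p' ++ ((" " :: m').take m'.length ++ ("%" :: "2" :: "0" :: d)) := by
          rw [show N - 3 = (((p'.length + m'.length) : Nat) : Int) by rw [hN]; simp; omega]
          rw [PySem.List.pySetD_natCast]
          rw [show (p' ++ " " :: m') ++ ("2" :: "0" :: d) = p' ++ ((" " :: m') ++ ("2" :: "0" :: d)) by simp]
          rw [pvSetShift]
          rw [pvSetAtLen (" " :: m') ("2" :: "0" :: d) "%" m'.length (by simp)]
        rw [w1, w2, w3]
        have hsnd : N - 3 = ((p'.length + ((" " :: m').take m'.length).length : Nat) : Int) := by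
          rw [hN]; simp; try omega
        rw [hsnd]
      rw [hstep, ih _ _ (by simp; omega)]
      simp [pvExpand]
    · have hm : mid.length = 2 * p'.countP (fun c => c == " ") := by
        simp only [List.countP_append, List.countP_cons] at h
        simp [ha] at h
        omega
      have hstep : fillStep ((p' ++ [a]) ++ (mid ++ d), N) ((p'.length : Nat) : Int)
          = (p' ++ ((a :: mid).take mid.length ++ (a :: d)),
             ((p'.length + ((a :: mid).take mid.length).length : Nat) : Int)) := by
        simp only [fillStep]
        rw [if_neg (by rw [hget]; exact ha)]
        rw [hget]
        have w1 : PySem.List.pySetD ((p' ++ [a]) ++ (mid ++ d)) (N - 1) a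
            = p' ++ ((a :: mid).take mid.length ++ (a :: d)) := by
          rw [show N - 1 = (((p'.length + mid.length) : Nat) : Int) by rw [hN]; simp; omega]
          rw [PySem.List.pySetD_natCast]
          rw [show (p' ++ [a]) ++ (mid ++ d) = p' ++ ((a :: mid) ++ d) by simp]
          rw [pvSetShift]
          rw [pvSetAtLen (a :: mid) d a mid.length (by simp)]
        rw [w1]
        have hsnd : N - 1 = ((p'.length + ((a :: mid).take mid.length).length : Nat) : Int) := by
          rw [hN]; simp; try omega
        rw [hsnd]
      rw [hstep, ih _ _ (by simp; omega)]
      simp [pvExpand, ha]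

-- ===== VERDICT (by name: the statement is the Claim_ definition above) =====
theorem replaceFast_spec : Claim_equal_replaceFast := by
  intro s _
  unfold Spec_replaceFast replaceFast
  rw [alt_eq_flatMap]
  split
  · next h0 => rw [List.length_eq_zero_iff.mp h0]; rfl
  split
  · next h1 =>
    obtain ⟨hl, hne⟩ := h1
    obtain ⟨a, rfl⟩ := List.length_eq_one_iff.mp hl
    simp [PySem.List.pyGetD_zero_cons] at hne
    simp [pvExpand, hne]
  · next h0 h1 =>
    simp only
    have hfold : List.foldl (fun (acc : Int) (letter : String) =>
        if letter = " " then acc + 1 else acc) 0 s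
        = ((s.countP fun c => c == " " : Nat) : Int) := by
      have hfun : (fun (acc : Int) (letter : String) => if letter = " " then acc + 1 else acc)
          = (fun acc letter => if (letter == " ") = true then acc + 1 else acc) := by
        funext acc letter
        by_cases hl : letter = " " <;> simp [hl]
      rw [hfun, PySem.List.foldl_count_if]
      simp
    rw [hfold]
    by_cases hcp : (s.countP fun c => c == " ") = 0
    · rw [if_pos (by rw [hcp]; rfl)]
      exact (flatMap_no_space s hcp).symm
    · rw [if_neg (by simpa using hcp)]
      rw [pad_foldl]
      rw [show (PySem.List.pyRange 0 (2 * ((s.countP fun c => c == " " : Nat) : Int)) 1).length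
          = 2 * (s.countP fun c => c == " ") by rw [PySem.List.length_pyRange_one]; omega]
      rw [show s ++ List.replicate (2 * (s.countP fun c => c == " ")) ""
          = s ++ (List.replicate (2 * (s.countP fun c => c == " ")) "" ++ []) by simp]
      rw [show (s.length : Int) + 2 * ((s.countP fun c => c == " " : Nat) : Int)
          = ((s.length + (List.replicate (2 * (s.countP fun c => c == " ")) "").length : Nat) : Int)
          by simp]
      rw [fill_loop s _ [] (by simp)]
      simp
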